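-- pv_equiv track=rewrite | github.com/ivanmkc/agent-generator | compare_runs_v6.py | get_suite_stats
-- ===== SOURCE A (Python) =====
-- def get_suite_stats(results):
--     suites = {}
--     for r in results:
--         suite = r.get('benchmark_name', '').split(':')[0]
--         if not suite: suite = "unknown"
--         if suite not in suites:
--             suites[suite] = {'total': 0, 'pass': 0}
--         suites[suite]['total'] += 1
--         if r.get('status') == 'pass':
--             suites[suite]['pass'] += 1
--     return suites
-- ===== SOURCE B (Python) =====
-- def _suite(r):
--     s = r.get('benchmark_name', '').split(':')[0]
--     return s if s else "unknown"
--
-- def get_suite_stats(results):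
--     groups = {}
--     for r in results:
--         groups.setdefault(_suite(r), []).append(r)
--     return {s: {'total': len(g), 'pass': sum(1 for r in g if r.get('status') == 'pass')}
--             for s, g in groups.items()}
-- ===== Notes on version B (the rewrite author's own statement) =====
-- stated objective: alternative
-- what changed: B groups the records per suite in one pass and then computes each suite's total/pass counts from its group in a second reducing pass, instead of A's single loop interleaving dict initialisation with two counter increments.
import Mathlib
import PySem

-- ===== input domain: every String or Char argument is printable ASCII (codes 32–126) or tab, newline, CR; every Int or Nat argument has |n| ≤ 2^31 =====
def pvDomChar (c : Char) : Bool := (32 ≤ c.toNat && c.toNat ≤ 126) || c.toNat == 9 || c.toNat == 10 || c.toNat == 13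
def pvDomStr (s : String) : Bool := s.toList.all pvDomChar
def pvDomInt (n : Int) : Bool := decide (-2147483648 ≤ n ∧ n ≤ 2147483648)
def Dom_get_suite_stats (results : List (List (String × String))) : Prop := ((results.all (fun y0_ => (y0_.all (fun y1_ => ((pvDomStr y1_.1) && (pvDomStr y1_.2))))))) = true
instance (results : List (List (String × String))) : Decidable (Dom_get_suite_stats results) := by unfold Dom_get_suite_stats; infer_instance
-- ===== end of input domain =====

-- B regroups the records per suite first and then reduces each group to its counts (group-then-reduce),
-- instead of A's single interleaved accumulation; same cost, different decomposition.

-- shared helpers: r.get(k) on an assoc-list record (first match), the suite key, and the pass test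
def pvRecGet? (r : List (String × String)) (k : String) : Option String :=
  (r.find? (fun p => p.1 == k)).map (·.2)

-- suite = r.get('benchmark_name', '').split(':')[0]; if not suite: suite = "unknown"
def pvSuite (r : List (String × String)) : String :=
  let s := (((PySem.Str.split? ((pvRecGet? r "benchmark_name").getD "") ":").getD []).headD "")
  if s = "" then "unknown" else s

-- r.get('status') == 'pass'
def pvIsPass (r : List (String × String)) : Bool :=
  pvRecGet? r "status" == some "pass"

-- ===== PORT A =====
-- one pass; suites : dict suite -> {'total': _, 'pass': _}
def pvStepA (suites : PySem.Dict String (PySem.Dict String Int)) (r : List (String × String)) :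
    PySem.Dict String (PySem.Dict String Int) :=
  let suite := pvSuite r
  let suites :=
    if suites.contains suite then suites
    else suites.insert suite (PySem.Dict.mk [("total", (0:Int)), ("pass", (0:Int))])
  let suites := suites.modify suite (PySem.Dict.mk []) (fun inner => inner.modify "total" 0 (· + 1))
  if pvIsPass r then suites.modify suite (PySem.Dict.mk []) (fun inner => inner.modify "pass" 0 (· + 1))
  else suites

def get_suite_stats (results : List (List (String × String))) : List (String × List (String × Int)) :=
  ((results.foldl pvStepA (PySem.Dict.mk [])).items).map (fun p => (p.1, p.2.items))

-- ===== PORT B =====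
-- first pass: group records by suite (setdefault-append); second pass: reduce each group to its counts
def get_suite_stats_alt (results : List (List (String × String))) : List (String × List (String × Int)) :=
  let groups :=
    results.foldl (fun g r => g.modify (pvSuite r) [] (fun lst => lst ++ [r])) (PySem.Dict.mk [])
  groups.items.map (fun p =>
    (p.1, [("total", ((p.2.length : Nat) : Int)), ("pass", ((p.2.countP pvIsPass : Nat) : Int))]))

-- ===== PRECONDITION & SPEC =====
def Spec_get_suite_stats (results : List (List (String × String))) (out : List (String × List (String × Int))) : Prop := out = get_suite_stats_alt results
instance (results : List (List (String × String))) (out : List (String × List (String × Int))) : Decidable (Spec_get_suite_stats results out) := by unfold Spec_get_suite_stats; infer_instance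

-- ===== CLAIM (what is proved, stated in full; the proofs are below) =====
def Claim_equal_get_suite_stats : Prop := ∀ (results : List (List (String × String))), Dom_get_suite_stats results → Spec_get_suite_stats results (get_suite_stats results)

-- ===== LEMMAS AND PROOFS =====

-- abstraction: a group of records ↦ its stats dict (A's inner dict)
def pvPhi (p : String × List (List (String × String))) : String × PySem.Dict String Int :=
  (p.1, PySem.Dict.mk [("total", ((p.2.length : Nat) : Int)), ("pass", ((p.2.countP pvIsPass : Nat) : Int))])

def pvStepB (g : PySem.Dict String (List (List (String × String)))) (r : List (String × String)) :
    PySem.Dict String (List (List (String × String))) :=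
  g.modify (pvSuite r) [] (fun lst => lst ++ [r])

lemma pvPhi_fst (p : String × List (List (String × String))) : (pvPhi p).1 = p.1 := rfl

lemma contains_map_phi (d : List (String × List (List (String × String)))) (s : String) :
    (PySem.Dict.mk (d.map pvPhi)).contains s = (PySem.Dict.mk d).contains s := by
  simp [PySem.Dict.contains, List.any_map, Function.comp_def, pvPhi_fst]

lemma find_map_phi (d : List (String × List (List (String × String)))) (s : String) :
    List.find? (fun p => p.1 == s) (d.map pvPhi)
      = (List.find? (fun p => p.1 == s) d).map pvPhi := by
  rw [List.find?_map]
  simp [Function.comp_def, pvPhi_fst]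

lemma find?_replace {β : Type} (l : List (String × β)) (s : String) (v : β)
    (h : l.any (fun p => p.1 == s) = true) :
    List.find? (fun p => p.1 == s)
      (l.map (fun p => if p.1 == s then (s, v) else p)) = some (s, v) := by
  induction l with
  | nil => simp at h
  | cons hd tl ih =>
    by_cases hk : hd.1 = s
    · simp [hk, List.find?]
    · have hb : (hd.1 == s) = false := by simp [hk]
      simp only [List.any_cons, hb, Bool.false_or] at h
      simp only [List.map_cons, hb, Bool.false_eq_true, if_false]
      rw [List.find?_cons_of_neg (by simp [hk])]
      exact ih h

lemma any_replace {β : Type} (l : List (String × β)) (s : String) (v : β)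
    (h : l.any (fun p => p.1 == s) = true) :
    (l.map (fun p => if p.1 == s then (s, v) else p)).any (fun p => p.1 == s) = true := by
  induction l with
  | nil => simp at h
  | cons hd tl ih =>
    by_cases hk : hd.1 = s
    · simp [hk]
    · have hb : (hd.1 == s) = false := by simp [hk]
      simp only [List.any_cons, hb, Bool.false_or] at h
      simp only [List.map_cons, hb, Bool.false_eq_true, if_false, List.any_cons, Bool.false_or]
      exact ih h

lemma replace_replace {β : Type} (l : List (String × β)) (s : String) (v w : β) :
    (l.map (fun p => if p.1 == s then (s, v) else p)).map (fun p => if p.1 == s then (s, w) else p)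
      = l.map (fun p => if p.1 == s then (s, w) else p) := by
  rw [List.map_map]
  apply List.map_congr_left
  intro p _
  by_cases hk : p.1 = s <;> simp [hk]

lemma replace_id {β : Type} (l : List (String × β)) (s : String) (v : β)
    (h : l.any (fun p => p.1 == s) = false) :
    l.map (fun p => if p.1 == s then (s, v) else p) = l := by
  induction l with
  | nil => rfl
  | cons hd tl ih =>
    simp only [List.any_cons, Bool.or_eq_false_iff] at h
    rw [List.map_cons, h.1]
    simp only [Bool.false_eq_true, if_false, ih h.2]

lemma find?_none {β : Type} (l : List (String × β)) (s : String)
    (h : l.any (fun p => p.1 == s) = false) :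
    List.find? (fun p => p.1 == s) l = none := by
  rw [List.find?_eq_none]
  intro x hx
  simp only [List.any_eq_false] at h
  exact h x hx

lemma countP_singleton_pass (r : List (String × String)) :
    (([r] : List (List (String × String))).countP pvIsPass) = if pvIsPass r then 1 else 0 := by
  by_cases hp : pvIsPass r <;> simp [List.countP, List.countP.go, hp]

lemma map_phi_replace (d : List (String × List (List (String × String)))) (s : String)
    (v : List (List (String × String))) :
    (d.map (fun p => if p.1 == s then (s, v) else p)).map pvPhi
      = (d.map pvPhi).map (fun p => if p.1 == s then (s, (pvPhi (s, v)).2) else p) := by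
  rw [List.map_map, List.map_map]
  apply List.map_congr_left
  intro p _
  by_cases hk : p.1 = s <;> simp [hk, pvPhi]

-- the single-record commutation: A's step on the abstracted state = abstraction of B's grouping step
lemma step_comm (d : List (String × List (List (String × String)))) (r : List (String × String)) :
    pvStepA (PySem.Dict.mk (d.map pvPhi)) r
      = PySem.Dict.mk (((pvStepB (PySem.Dict.mk d) r).items).map pvPhi) := by
  by_cases h : (PySem.Dict.mk d).contains (pvSuite r) = true
  · -- suite already present: both sides replace the suite's entry in place
    have hφ : (PySem.Dict.mk (d.map pvPhi)).contains (pvSuite r) = true := by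
      rw [contains_map_phi]; exact h
    have hcφ : ((d.map pvPhi).any fun p => p.1 == pvSuite r) = true := hφ
    have hany : (d.any fun p => p.1 == pvSuite r) = true := h
    have hsome : (List.find? (fun p => p.1 == pvSuite r) d).isSome := by
      rw [List.find?_isSome]; simpa using hany
    obtain ⟨q, hq⟩ := Option.isSome_iff_exists.mp hsome
    -- B side: modify = in-place replacement with the grown group
    have hB : pvStepB (PySem.Dict.mk d) r
        = PySem.Dict.mk (d.map (fun p => if p.1 == pvSuite r then (pvSuite r, q.2 ++ [r]) else p)) := by
      unfold pvStepB
      simp only [PySem.Dict.modify, PySem.Dict.getD, PySem.Dict.get?, PySem.Dict.items, hq,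
        Option.map_some, Option.getD_some, PySem.Dict.insert]
      rw [if_pos h]
    -- A side, first modify: fetch the suite's stats row and bump 'total'
    have hget : (PySem.Dict.mk (d.map pvPhi)).getD (pvSuite r) (PySem.Dict.mk [])
        = PySem.Dict.mk [("total", ((q.2.length : Nat) : Int)), ("pass", ((q.2.countP pvIsPass : Nat) : Int))] := by
      simp only [PySem.Dict.getD, PySem.Dict.get?, PySem.Dict.items]
      rw [find_map_phi, hq]; rfl
    have e2 : (PySem.Dict.mk (d.map pvPhi)).modify (pvSuite r) (PySem.Dict.mk [])
          (fun inner => inner.modify "total" 0 (· + 1))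
        = PySem.Dict.mk ((d.map pvPhi).map (fun p => if p.1 == pvSuite r then
            (pvSuite r, PySem.Dict.mk [("total", ((q.2.length : Nat) : Int) + 1), ("pass", ((q.2.countP pvIsPass : Nat) : Int))]) else p)) := by
      simp only [PySem.Dict.modify, hget, PySem.Dict.insert, hφ, if_true]
      simp [PySem.Dict.contains, PySem.Dict.getD, PySem.Dict.get?, List.find?]
    have e3 : (PySem.Dict.mk ((d.map pvPhi).map (fun p => if p.1 == pvSuite r then
            (pvSuite r, PySem.Dict.mk [("total", ((q.2.length : Nat) : Int) + 1), ("pass", ((q.2.countP pvIsPass : Nat) : Int))]) else p))).modify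
          (pvSuite r) (PySem.Dict.mk []) (fun inner => inner.modify "pass" 0 (· + 1))
        = PySem.Dict.mk (((d.map pvPhi).map (fun p => if p.1 == pvSuite r then
            (pvSuite r, PySem.Dict.mk [("total", ((q.2.length : Nat) : Int) + 1), ("pass", ((q.2.countP pvIsPass : Nat) : Int))]) else p)).map
            (fun p => if p.1 == pvSuite r then
            (pvSuite r, PySem.Dict.mk [("total", ((q.2.length : Nat) : Int) + 1), ("pass", ((q.2.countP pvIsPass : Nat) : Int) + 1)]) else p)) := by
      simp only [PySem.Dict.modify, PySem.Dict.getD, PySem.Dict.get?, PySem.Dict.items]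
      rw [find?_replace _ _ _ hcφ]
      simp only [Option.map_some, Option.getD_some, PySem.Dict.modify, PySem.Dict.insert,
        PySem.Dict.contains, PySem.Dict.items]
      rw [if_pos (any_replace _ _ _ hcφ)]
      simp [PySem.Dict.contains, PySem.Dict.getD, PySem.Dict.get?, List.find?]
    unfold pvStepA
    simp only [hφ, if_true]
    rw [e2]
    by_cases hp : pvIsPass r
    · have hV : (pvPhi (pvSuite r, q.2 ++ [r])).2
          = PySem.Dict.mk [("total", ((q.2.length : Nat) : Int) + 1), ("pass", ((q.2.countP pvIsPass : Nat) : Int) + 1)] := by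
        simp [pvPhi, List.countP_append, countP_singleton_pass, hp, Nat.cast_add, Nat.cast_one]
      simp only [hp, if_true]
      rw [e3, replace_replace, hB]
      simp only [PySem.Dict.items, map_phi_replace, hV]
    · have hV : (pvPhi (pvSuite r, q.2 ++ [r])).2
          = PySem.Dict.mk [("total", ((q.2.length : Nat) : Int) + 1), ("pass", ((q.2.countP pvIsPass : Nat) : Int))] := by
        simp [pvPhi, List.countP_append, countP_singleton_pass, hp, Nat.cast_add, Nat.cast_one]
      simp only [hp, Bool.false_eq_true, if_false]
      rw [hB]
      simp only [PySem.Dict.items, map_phi_replace, hV]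
  · -- new suite: both sides append a fresh entry
    have hfalse : (d.any fun p => p.1 == pvSuite r) = false := by
      exact Bool.eq_false_iff.mpr h
    have hφfalse : ((d.map pvPhi).any fun p => p.1 == pvSuite r) = false := by
      have hc := contains_map_phi d (pvSuite r)
      simp only [PySem.Dict.contains, PySem.Dict.items] at hc
      rw [hc]; exact hfalse
    -- B side: append a singleton group
    have hB : pvStepB (PySem.Dict.mk d) r = PySem.Dict.mk (d ++ [(pvSuite r, [r])]) := by
      unfold pvStepB
      simp only [PySem.Dict.modify, PySem.Dict.getD, PySem.Dict.get?, PySem.Dict.items,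
        find?_none d _ hfalse, Option.map_none, Option.getD_none, PySem.Dict.insert,
        PySem.Dict.contains]
      rw [if_neg (by rw [hfalse]; exact Bool.false_ne_true)]
      rfl
    have n1 : (PySem.Dict.mk (d.map pvPhi)).insert (pvSuite r)
          (PySem.Dict.mk [("total", (0:Int)), ("pass", (0:Int))])
        = PySem.Dict.mk (d.map pvPhi ++ [(pvSuite r, PySem.Dict.mk [("total", (0:Int)), ("pass", (0:Int))])]) := by
      simp only [PySem.Dict.insert, PySem.Dict.contains, PySem.Dict.items]
      rw [if_neg (by rw [hφfalse]; exact Bool.false_ne_true)]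
    have hfind1 : List.find? (fun p => p.1 == pvSuite r)
        (d.map pvPhi ++ [(pvSuite r, PySem.Dict.mk [("total", (0:Int)), ("pass", (0:Int))])])
        = some (pvSuite r, PySem.Dict.mk [("total", (0:Int)), ("pass", (0:Int))]) := by
      rw [List.find?_append, find?_none _ _ hφfalse]
      simp
    have n2 : (PySem.Dict.mk (d.map pvPhi ++ [(pvSuite r, PySem.Dict.mk [("total", (0:Int)), ("pass", (0:Int))])])).modify
          (pvSuite r) (PySem.Dict.mk []) (fun inner => inner.modify "total" 0 (· + 1))
        = PySem.Dict.mk (d.map pvPhi ++ [(pvSuite r, PySem.Dict.mk [("total", (0:Int) + 1), ("pass", (0:Int))])]) := by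
      simp only [PySem.Dict.modify, PySem.Dict.getD, PySem.Dict.get?, PySem.Dict.items, hfind1,
        Option.map_some, Option.getD_some, PySem.Dict.insert, PySem.Dict.contains]
      rw [if_pos (by simp [List.any_append]), List.map_append, replace_id _ _ _ hφfalse]
      simp [PySem.Dict.contains, PySem.Dict.getD, PySem.Dict.get?, List.find?]
    have hfind2 : List.find? (fun p => p.1 == pvSuite r)
        (d.map pvPhi ++ [(pvSuite r, PySem.Dict.mk [("total", (0:Int) + 1), ("pass", (0:Int))])])
        = some (pvSuite r, PySem.Dict.mk [("total", (0:Int) + 1), ("pass", (0:Int))]) := by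
      rw [List.find?_append, find?_none _ _ hφfalse]
      simp
    have n3 : (PySem.Dict.mk (d.map pvPhi ++ [(pvSuite r, PySem.Dict.mk [("total", (0:Int) + 1), ("pass", (0:Int))])])).modify
          (pvSuite r) (PySem.Dict.mk []) (fun inner => inner.modify "pass" 0 (· + 1))
        = PySem.Dict.mk (d.map pvPhi ++ [(pvSuite r, PySem.Dict.mk [("total", (0:Int) + 1), ("pass", (0:Int) + 1)])]) := by
      simp only [PySem.Dict.modify, PySem.Dict.getD, PySem.Dict.get?, PySem.Dict.items, hfind2,
        Option.map_some, Option.getD_some, PySem.Dict.insert, PySem.Dict.contains]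
      rw [if_pos (by simp [List.any_append]), List.map_append, replace_id _ _ _ hφfalse]
      simp [PySem.Dict.contains, PySem.Dict.getD, PySem.Dict.get?, List.find?]
    have hφC : (PySem.Dict.mk (d.map pvPhi)).contains (pvSuite r) = false := hφfalse
    unfold pvStepA
    simp only [hφC, Bool.false_eq_true, if_false]
    rw [n1, n2]
    by_cases hp : pvIsPass r
    · simp only [hp, if_true]
      rw [n3, hB]
      simp only [PySem.Dict.items, List.map_append]
      simp [pvPhi, countP_singleton_pass, hp]
    · simp only [hp, Bool.false_eq_true, if_false]
      rw [hB]
      simp only [PySem.Dict.items, List.map_append]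
      simp [pvPhi, countP_singleton_pass, hp]

lemma fold_comm (results : List (List (String × String)))
    (d : List (String × List (List (String × String)))) :
    results.foldl pvStepA (PySem.Dict.mk (d.map pvPhi))
      = PySem.Dict.mk (((results.foldl pvStepB (PySem.Dict.mk d)).items).map pvPhi) := by
  induction results generalizing d with
  | nil => rfl
  | cons r rs ih =>
    simp only [List.foldl_cons]
    rw [step_comm d r, ih]

-- ===== VERDICT (by name: the statement is the Claim_ definition above) =====
theorem get_suite_stats_spec : Claim_equal_get_suite_stats := by
  intro results _
  unfold Spec_get_suite_stats get_suite_stats get_suite_stats_alt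
  have h := fold_comm results []
  simp only [List.map_nil] at h
  rw [h, List.map_map]
  rfl
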